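-- pv_equiv track=rewrite | github.com/kjworld313/CSCI200a | ciphers/ciphers.py | keyword_helper
-- ===== SOURCE A (Python) =====
-- def keyword_helper(ascii_position:int, right_bound:int, keyword:str, alphabet:list)->dict:
--     '''The keyword_helper function takes four arguments: ascii_position (int), right_bound (integer),
--     keyword (string), and alphabet (list of strings). The function takes an ascii position to start producing keys for,
--     assigns letters in the keyword to alphabet letters as keys, and fills the dictionary with remaining letters
--     after letters from the keyword have been used as values. The function outputs a dictionary, the alphabet
--     mapped to encrypted alphabet.'''
--     keyword_alphabet = {} # empty dictionary to hold alphabet mapped to keyword alphabet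
--     remaining_letters = [] # empty list to hold and keep track of remaining letters available for use
--     position = 0 # iterator to keep track of index in keyword
--
--     for letter in alphabet:
--         remaining_letters.append(letter)
--
--     # go through keyword and map each letter to sequential letters in alphabet
--     while (position < len(keyword)): # once keyword letters are exhausted, stop
--         # make sure the letter is a unique value
--         if (keyword[position] not in keyword_alphabet.values()):
--             # create a key value pair with the letter as key and encrypted letter as value
--             keyword_alphabet[chr(ascii_position)] = keyword[position]
--             remaining_letters.remove(keyword[position]) # remove letter from available letters
--             ascii_position += 1 # go to next letter in alphabet
--         position += 1 # go to next letter in keyword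
--
--     # start at next letter and iterate up until right bound (ex: ascii 'z' (122) or ascii 'Z' (90)) to fill remaining letters
--     while (ascii_position <= right_bound and len(remaining_letters) != 0):
--         # create a key value pair with letter as key and the first remaining letter as a value
--         keyword_alphabet[chr(ascii_position)] = remaining_letters[0]
--         remaining_letters.remove(remaining_letters[0]) # remove the letter from the list
--         ascii_position += 1
--
--     return keyword_alphabet
-- ===== SOURCE B (Python) =====
-- def keyword_helper(ascii_position: int, right_bound: int, keyword: str, alphabet: list) -> dict:
--     """Materialize the value sequence first, then map it onto consecutive chr keys.
--     seen = keyword letters deduplicated (first occurrence); each one is removed from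
--     the remaining alphabet letters; a closed-form count decides how many remaining
--     letters still fit below right_bound."""
--     remaining = list(alphabet)
--     seen = []
--     for ch in keyword:
--         if ch not in seen:
--             seen.append(ch)
--             remaining.remove(ch)
--     n = max(0, min(len(remaining), right_bound - ascii_position - len(seen) + 1))
--     values = seen + remaining[:n]
--     return {chr(ascii_position + i): v for i, v in enumerate(values)}
-- ===== Notes on version B (the rewrite author's own statement) =====
-- stated objective: simpler
-- what changed: A's two interleaved stateful while-loops (dict grown while scanning the keyword, then a bound-driven fill loop) are replaced by materialise-then-map: dedup the keyword into seen, compute a closed-form count n of leftover alphabet letters that fit below right_bound, and build the dict in a single enumerate comprehension over seen + remaining[:n].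
import Mathlib
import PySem

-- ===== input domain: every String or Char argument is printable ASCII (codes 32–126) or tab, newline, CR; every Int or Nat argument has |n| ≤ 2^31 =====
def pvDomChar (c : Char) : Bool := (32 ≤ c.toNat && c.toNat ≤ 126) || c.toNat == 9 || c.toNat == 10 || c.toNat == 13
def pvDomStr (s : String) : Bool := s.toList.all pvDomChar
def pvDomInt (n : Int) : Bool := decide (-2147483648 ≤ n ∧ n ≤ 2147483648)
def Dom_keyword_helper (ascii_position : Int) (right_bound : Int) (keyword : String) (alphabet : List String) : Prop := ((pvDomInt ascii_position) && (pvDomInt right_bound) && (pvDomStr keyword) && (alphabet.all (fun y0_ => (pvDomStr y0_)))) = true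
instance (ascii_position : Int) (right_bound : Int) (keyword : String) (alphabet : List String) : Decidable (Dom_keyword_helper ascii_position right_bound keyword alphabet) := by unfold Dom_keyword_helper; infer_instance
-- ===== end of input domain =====

-- B replaces A's two interleaved stateful while-loops by materialise-then-map: dedup the keyword,
-- take a closed-form number of leftover letters, and build the dict in one enumerate pass (objective: simpler).

-- hand port of Python's chr(n) (PySem has none): exact wherever the result is a valid Unicode
-- scalar (0 ≤ n < 0x110000 and not a lone surrogate); Pre_ excludes every call outside that range.
def pyChr (n : Int) : String :=
  if 0 ≤ n ∧ n < 1114112 then String.singleton (Char.ofNat n.toNat) else ""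

-- ===== PORT A =====
-- first while-loop: position walks the keyword; a fresh letter is keyed at ascii_position and
-- removed from remaining_letters (remove raising ValueError = none is replaced by getD; Pre_ excludes it)
def khKeyLoop (cs : List Char) (ascii_position : Int) (keyword_alphabet : PySem.Dict String String)
    (remaining_letters : List String) : Int × PySem.Dict String String × List String :=
  match cs with
  | [] => (ascii_position, keyword_alphabet, remaining_letters)
  | c :: rest =>
    if String.singleton c ∈ keyword_alphabet.values then
      khKeyLoop rest ascii_position keyword_alphabet remaining_letters
    else
      khKeyLoop rest (ascii_position + 1)
        (keyword_alphabet.insert (pyChr ascii_position) (String.singleton c))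
        ((PySem.List.remove? remaining_letters (String.singleton c)).getD remaining_letters)

-- second while-loop: remaining_letters.remove(remaining_letters[0]) deletes index 0, i.e. the head
def khFill (keyword_alphabet : PySem.Dict String String) (remaining_letters : List String)
    (ascii_position : Int) (right_bound : Int) : PySem.Dict String String :=
  match remaining_letters with
  | [] => keyword_alphabet
  | v :: rest =>
    if ascii_position ≤ right_bound then
      khFill (keyword_alphabet.insert (pyChr ascii_position) v) rest (ascii_position + 1) right_bound
    else keyword_alphabet

def keyword_helper (ascii_position : Int) (right_bound : Int) (keyword : String) (alphabet : List String) : List (String × String) :=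
  let s := khKeyLoop keyword.toList ascii_position PySem.Dict.empty alphabet
  (khFill s.2.1 s.2.2 s.1 right_bound).items

-- ===== PORT B =====
-- Source B's dedup loop: seen keeps the keyword's distinct letters in first-occurrence order,
-- each one removed from remaining (ValueError = none replaced by getD; Pre_ excludes it)
def khDedup (cs : List Char) (seen : List String) (remaining : List String) : List String × List String :=
  match cs with
  | [] => (seen, remaining)
  | c :: rest =>
    if String.singleton c ∈ seen then khDedup rest seen remaining
    else khDedup rest (seen ++ [String.singleton c])
      ((PySem.List.remove? remaining (String.singleton c)).getD remaining)

def keyword_helper_alt (ascii_position : Int) (right_bound : Int) (keyword : String) (alphabet : List String) : List (String × String) :=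
  let p := khDedup keyword.toList [] alphabet
  let n : Int := max 0 (min (p.2.length : Int) (right_bound - ascii_position - (p.1.length : Int) + 1))
  let values : List String := p.1 ++ PySem.List.slice p.2 none (some n)
  ((PySem.List.enumerate values 0).foldl
    (fun d iv => d.insert (pyChr (ascii_position + iv.1)) iv.2) PySem.Dict.empty).items

-- ===== PRECONDITION & SPEC =====
-- Pre_ excludes (a) keyword letters missing from the alphabet — list.remove raises ValueError in A —
-- and (b) inputs whose dict keys chr(…) would raise on or would be lone surrogate code points
-- (U+D800–U+DFFF): A then returns a Python dict whose keys are not representable as Lean Strings.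
def Pre_keyword_helper (ascii_position : Int) (right_bound : Int) (keyword : String) (alphabet : List String) : Prop :=
  keyword.toList.all (fun c => alphabet.contains (String.singleton c)) = true ∧
  (let k : Int := (PySem.List.dedup keyword.toList).length
   let r : Int := (alphabet.length : Int) - k
   let m : Int := if 0 < r ∧ ascii_position + k ≤ right_bound then
                    min r (right_bound - (ascii_position + k) + 1) else 0
   0 < k + m →
     0 ≤ ascii_position ∧ ascii_position + (k + m) ≤ 1114112 ∧
       (ascii_position + (k + m) ≤ 55296 ∨ 57344 ≤ ascii_position))
instance (ascii_position : Int) (right_bound : Int) (keyword : String) (alphabet : List String) : Decidable (Pre_keyword_helper ascii_position right_bound keyword alphabet) := by unfold Pre_keyword_helper; infer_instance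

def pvWitness_keyword_helper : Int × Int × String × List String := (97, 122, "key", ["k", "e", "y", "a", "b"])

def Spec_keyword_helper (ascii_position : Int) (right_bound : Int) (keyword : String) (alphabet : List String) (out : List (String × String)) : Prop := out = keyword_helper_alt ascii_position right_bound keyword alphabet
instance (ascii_position : Int) (right_bound : Int) (keyword : String) (alphabet : List String) (out : List (String × String)) : Decidable (Spec_keyword_helper ascii_position right_bound keyword alphabet out) := by unfold Spec_keyword_helper; infer_instance

-- ===== CLAIM (what is proved, stated in full; the proofs are below) =====
def Claim_equal_keyword_helper : Prop := ∀ (ascii_position : Int) (right_bound : Int) (keyword : String) (alphabet : List String), Dom_keyword_helper ascii_position right_bound keyword alphabet → Pre_keyword_helper ascii_position right_bound keyword alphabet → Spec_keyword_helper ascii_position right_bound keyword alphabet (keyword_helper ascii_position right_bound keyword alphabet)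

-- ===== LEMMAS AND PROOFS =====

-- n is a valid, non-surrogate code point: there pyChr is injective
def ChrOk (n : Int) : Prop := 0 ≤ n ∧ n < 1114112 ∧ (n < 55296 ∨ 57344 ≤ n)

lemma pyChr_inj {m n : Int} (hm : ChrOk m) (hn : ChrOk n) (h : pyChr m = pyChr n) : m = n := by
  obtain ⟨hm0, hm1, hm2⟩ := hm
  obtain ⟨hn0, hn1, hn2⟩ := hn
  unfold pyChr at h
  rw [if_pos ⟨hm0, hm1⟩, if_pos ⟨hn0, hn1⟩] at h
  have h2 : Char.ofNat m.toNat = Char.ofNat n.toNat := by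
    have := congrArg String.toList h; simpa using this
  have hvm : Nat.isValidChar m.toNat := by unfold Nat.isValidChar; omega
  have hvn : Nat.isValidChar n.toNat := by unfold Nat.isValidChar; omega
  have : (Char.ofNat m.toNat).toNat = (Char.ofNat n.toNat).toNat := by rw [h2]
  rw [show (Char.ofNat m.toNat).toNat = m.toNat by simp [Char.ofNat, hvm],
      show (Char.ofNat n.toNat).toNat = n.toNat by simp [Char.ofNat, hvn]] at this
  omega

-- the association list both results amount to: values keyed consecutively from ap
def mkItems (ap : Int) : List String → List (String × String)
  | [] => []
  | v :: vs => (pyChr ap, v) :: mkItems (ap + 1) vs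

lemma mkItems_append (xs ys : List String) : ∀ ap : Int,
    mkItems ap (xs ++ ys) = mkItems ap xs ++ mkItems (ap + xs.length) ys := by
  induction xs with
  | nil => simp [mkItems]
  | cons x xs ih =>
    intro ap
    simp only [List.cons_append, mkItems, ih (ap + 1), List.length_cons]
    rw [show (((xs.length + 1 : Nat)) : Int) = (xs.length : Int) + 1 by push_cast; ring,
        show ap + ((xs.length : Int) + 1) = ap + 1 + xs.length by ring]

lemma values_mkItems (vs : List String) : ∀ ap, (mkItems ap vs).map (·.2) = vs := by
  induction vs with
  | nil => intro ap; simp [mkItems]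
  | cons v vs ih => intro ap; simp [mkItems, ih]

lemma mem_keys_mkItems {s : String} (vs : List String) : ∀ ap,
    s ∈ (mkItems ap vs).map (·.1) ↔ ∃ i : Int, 0 ≤ i ∧ i < vs.length ∧ s = pyChr (ap + i) := by
  induction vs with
  | nil => intro ap; simp [mkItems]; intro x h1 h2; omega
  | cons v vs ih =>
    intro ap
    simp only [mkItems, List.map_cons, List.mem_cons, ih (ap + 1), List.length_cons]
    constructor
    · rintro (h | ⟨i, h0, hi, rfl⟩)
      · exact ⟨0, le_refl _, by push_cast; omega, by simpa using h⟩
      · exact ⟨i + 1, by omega, by push_cast; omega,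
          by rw [show ap + (i + 1) = ap + 1 + i by ring]⟩
    · rintro ⟨i, h0, hi, rfl⟩
      by_cases hz : i = 0
      · left; simp [hz]
      · right
        exact ⟨i - 1, by omega, by push_cast at hi ⊢; omega,
          by rw [show ap + 1 + (i - 1) = ap + i by ring]⟩

-- khDedup's first component does not depend on remaining: it is the running set of seen letters
lemma khDedup_fst (cs : List Char) : ∀ seen rem,
    (khDedup cs seen rem).1 = PySem.Set.update seen (cs.map String.singleton) := by
  induction cs with
  | nil => intro seen rem; simp [khDedup, PySem.Set.update]
  | cons c rest ih =>
    intro seen rem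
    simp only [khDedup, List.map_cons, PySem.Set.update_cons]
    by_cases h : String.singleton c ∈ seen
    · rw [if_pos h, ih, PySem.Set.add_of_mem h]
    · rw [if_neg h, ih, PySem.Set.add_of_not_mem h]

lemma set_update_map {α β : Type} [DecidableEq α] [DecidableEq β] (f : α → β)
    (hf : Function.Injective f) (cs : List α) : ∀ s : List α,
    PySem.Set.update (s.map f) (cs.map f) = (PySem.Set.update s cs).map f := by
  induction cs with
  | nil => intro s; simp [PySem.Set.update]
  | cons c rest ih =>
    intro s
    simp only [List.map_cons, PySem.Set.update_cons]
    by_cases h : c ∈ s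
    · rw [PySem.Set.add_of_mem h, PySem.Set.add_of_mem (List.mem_map_of_mem h), ih]
    · rw [PySem.Set.add_of_not_mem h, PySem.Set.add_of_not_mem (by
        simpa [List.mem_map, hf.eq_iff] using h),
        show List.map f s ++ [f c] = List.map f (s ++ [c]) by simp, ih]

lemma singleton_injective : Function.Injective String.singleton := by
  intro a b h
  have := congrArg String.toList h
  simpa using this

-- khDedup with empty seen collects the distinct keyword letters in first-occurrence order
lemma khDedup_nil_fst (cs : List Char) (rem : List String) :
    (khDedup cs [] rem).1 = (PySem.List.dedup cs).map String.singleton := by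
  rw [khDedup_fst]
  have := set_update_map String.singleton singleton_injective cs (s := [])
  simpa [PySem.List.dedup_eq_ofList, PySem.Set.update_nil_left] using this

-- each distinct keyword letter found in the alphabet removes exactly one leftover
lemma khDedup_len (cs : List Char) : ∀ seen rem,
    (∀ c ∈ cs, String.singleton c ∈ rem ∨ String.singleton c ∈ seen) →
    (khDedup cs seen rem).2.length + (khDedup cs seen rem).1.length = rem.length + seen.length := by
  induction cs with
  | nil => intro seen rem _; simp [khDedup]
  | cons c rest ih =>
    intro seen rem hrem
    simp only [khDedup]
    by_cases h : String.singleton c ∈ seen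
    · rw [if_pos h]
      exact ih seen rem (fun c' hc' => hrem c' (List.mem_cons_of_mem _ hc'))
    · rw [if_neg h]
      have hc : String.singleton c ∈ rem := (hrem c (List.mem_cons_self)).resolve_right h
      rw [PySem.List.remove?_eq_some_erase rem _ hc]
      have hlen : (rem.erase (String.singleton c)).length + 1 = rem.length :=
        List.length_erase_add_one hc
      have := ih (seen ++ [String.singleton c]) (rem.erase (String.singleton c)) (by
        intro c' hc'
        rcases hrem c' (List.mem_cons_of_mem _ hc') with h1 | h1
        · by_cases he : String.singleton c' = String.singleton c
          · right; rw [he]; simp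
          · left; exact (List.mem_erase_of_ne he).mpr h1
        · right; exact List.mem_append_left _ h1)
      simp only [Option.getD_some]
      simp only [List.length_append, List.length_cons, List.length_nil] at this ⊢
      omega

-- the first while-loop of A computes exactly B's dedup state, the dict being mkItems of seen
lemma key_loop (cs : List Char) : ∀ (seen rem : List String) (ap0 : Int),
    (∀ i : Int, 0 ≤ i → i < ((PySem.Set.update seen (cs.map String.singleton)).length : Int) →
      ChrOk (ap0 + i)) →
    khKeyLoop cs (ap0 + seen.length) (PySem.Dict.mk (mkItems ap0 seen)) rem
      = (ap0 + ((khDedup cs seen rem).1.length : Int),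
         PySem.Dict.mk (mkItems ap0 (khDedup cs seen rem).1), (khDedup cs seen rem).2) := by
  induction cs with
  | nil => intro seen rem ap0 _; simp [khKeyLoop, khDedup]
  | cons c rest ih =>
    intro seen rem ap0 hval
    have hvalues : (PySem.Dict.mk (mkItems ap0 seen)).values = seen := values_mkItems seen ap0
    simp only [khKeyLoop, khDedup, hvalues]
    by_cases h : String.singleton c ∈ seen
    · rw [if_pos h, if_pos h]
      exact ih seen rem ap0 (by
        intro i h0 hi
        apply hval i h0
        simpa [PySem.Set.update_cons, PySem.Set.add_of_mem h] using hi)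
    · rw [if_neg h, if_neg h]
      have hupd : PySem.Set.update seen ((c :: rest).map String.singleton)
          = PySem.Set.update (seen ++ [String.singleton c]) (rest.map String.singleton) := by
        simp [PySem.Set.update_cons, PySem.Set.add_of_not_mem h]
      have hlen : seen.length < (PySem.Set.update seen ((c :: rest).map String.singleton)).length := by
        rw [hupd, PySem.Set.update_eq_append_filter]
        simp
      -- the inserted key is fresh: all existing keys are earlier valid code points
      have hfresh : ¬ (pyChr (ap0 + seen.length) ∈ (mkItems ap0 seen).map (·.1)) := by
        rw [mem_keys_mkItems]
        rintro ⟨i, h0, hi, heq⟩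
        have : ap0 + (seen.length : Int) = ap0 + i :=
          pyChr_inj (hval seen.length (by positivity) (by exact_mod_cast hlen))
            (hval i h0 (by omega)) heq
        omega
      have hcont : (PySem.Dict.mk (mkItems ap0 seen)).contains (pyChr (ap0 + seen.length)) = false := by
        cases hc : (PySem.Dict.mk (mkItems ap0 seen)).contains (pyChr (ap0 + seen.length))
        · rfl
        · exact absurd ((PySem.Dict.contains_iff_mem_keys _ _).mp hc)
            (by simpa [PySem.Dict.keys] using hfresh)
      have hins : (PySem.Dict.mk (mkItems ap0 seen)).insert (pyChr (ap0 + seen.length))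
            (String.singleton c)
          = PySem.Dict.mk (mkItems ap0 (seen ++ [String.singleton c])) := by
        apply PySem.Dict.ext
        rw [PySem.Dict.items_insert_of_not_contains _ _ hcont, mkItems_append]
        simp [mkItems]
      have harith : ap0 + (seen.length : Int) + 1
          = ap0 + (((seen ++ [String.singleton c]).length : Nat) : Int) := by
        simp; ring
      rw [harith, hins, ih (seen ++ [String.singleton c]) _ ap0 (by
        intro i h0 hi
        apply hval i h0
        rwa [hupd])]

-- the second while-loop of A appends mkItems of a leftover prefix; the guard in closed form
lemma fill_items (rem : List String) : ∀ (ap rb : Int) (d : PySem.Dict String String),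
    (∀ i : Int, 0 ≤ i → i < min (rem.length : Int) (rb - ap + 1) →
      pyChr (ap + i) ∉ d.items.map (·.1)) →
    (∀ i : Int, 0 ≤ i → i < min (rem.length : Int) (rb - ap + 1) → ChrOk (ap + i)) →
    khFill d rem ap rb
      = PySem.Dict.mk (d.items ++ mkItems ap (rem.take (min (rem.length : Int) (rb - ap + 1)).toNat)) := by
  induction rem with
  | nil => intro ap rb d _ _; simp [khFill, mkItems]
  | cons v rest ih =>
    intro ap rb d hfresh hval
    simp only [khFill]
    by_cases h : ap ≤ rb
    · rw [if_pos h]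
      have hm0 : (0 : Int) < min ((v :: rest).length : Int) (rb - ap + 1) := by
        simp only [List.length_cons]; push_cast; omega
      have hcont : d.contains (pyChr ap) = false := by
        have hf := hfresh 0 (le_refl _) hm0
        rw [add_zero] at hf
        cases hc : d.contains (pyChr ap)
        · rfl
        · exact absurd ((PySem.Dict.contains_iff_mem_keys _ _).mp hc)
            (by simpa [PySem.Dict.keys] using hf)
      have hins : d.insert (pyChr ap) v = PySem.Dict.mk (d.items ++ [(pyChr ap, v)]) := by
        apply PySem.Dict.ext
        rw [PySem.Dict.items_insert_of_not_contains _ _ hcont]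
      rw [hins, ih (ap + 1) rb _ (by
          intro i h0 hi
          simp only [List.map_append, List.mem_append, List.map_cons,
            List.map_nil, List.mem_cons, List.not_mem_nil, or_false]
          push Not
          refine ⟨?_, ?_⟩
          · have := hfresh (i + 1) (by omega)
              (by simp only [List.length_cons] at hi ⊢; push_cast at hi ⊢; omega)
            rwa [show ap + (i + 1) = ap + 1 + i by ring] at this
          · intro heq
            have h1 := hval (i + 1) (by omega)
              (by simp only [List.length_cons] at hi ⊢; push_cast at hi ⊢; omega)
            have h2 := hval 0 (le_refl _) hm0
            rw [show ap + (i + 1) = ap + 1 + i by ring] at h1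
            rw [add_zero] at h2
            have := pyChr_inj h1 h2 heq
            omega)
        (by
          intro i h0 hi
          have := hval (i + 1) (by omega)
            (by simp only [List.length_cons] at hi ⊢; push_cast at hi ⊢; omega)
          rwa [show ap + (i + 1) = ap + 1 + i by ring] at this)]
      have htake : (v :: rest).take (min ((v :: rest).length : Int) (rb - ap + 1)).toNat
          = v :: rest.take (min (rest.length : Int) (rb - (ap + 1) + 1)).toNat := by
        rw [show (min ((v :: rest).length : Int) (rb - ap + 1)).toNat
            = (min (rest.length : Int) (rb - (ap + 1) + 1)).toNat + 1 by
          simp only [List.length_cons]; push_cast; omega]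
        rw [List.take_succ_cons]
      rw [htake]
      simp only [mkItems, List.append_assoc, List.singleton_append]
    · rw [if_neg h]
      rw [show (min ((v :: rest).length : Int) (rb - ap + 1)).toNat = 0 by
        simp only [List.length_cons]; push_cast; omega]
      simp only [List.take_zero, mkItems, List.append_nil]

-- B's enumerate comprehension over fresh keys lists exactly mkItems
lemma enum_map (vs : List String) : ∀ (s ap : Int),
    (PySem.List.enumerate vs s).map (fun iv => (pyChr (ap + iv.1), iv.2)) = mkItems (ap + s) vs := by
  induction vs with
  | nil => intro s ap; simp [PySem.List.enumerate_nil, mkItems]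
  | cons v vs ih =>
    intro s ap
    rw [PySem.List.enumerate_cons]
    simp only [List.map_cons, mkItems, ih (s + 1) ap]
    rw [show ap + (s + 1) = ap + s + 1 by ring]

lemma b_build (vs : List String) (ap : Int)
    (hval : ∀ i : Int, 0 ≤ i → i < (vs.length : Int) → ChrOk (ap + i)) :
    ((PySem.List.enumerate vs 0).foldl
      (fun d iv => d.insert (pyChr (ap + iv.1)) iv.2) PySem.Dict.empty).items = mkItems ap vs := by
  have hp : (PySem.List.enumerate vs 0).Pairwise (fun p q => pyChr (ap + p.1) ≠ pyChr (ap + q.1)) := by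
    refine (PySem.List.pairwise_lt_enumerate vs 0).imp_of_mem ?_
    intro a b ha hb hlt heq
    rw [PySem.List.mem_enumerate_iff] at ha hb
    obtain ⟨ka, hka, rfl⟩ := ha
    obtain ⟨kb, hkb, rfl⟩ := hb
    have hva : ChrOk (ap + ((0 : Int) + ka)) := hval _ (by positivity) (by omega)
    have hvb : ChrOk (ap + ((0 : Int) + kb)) := hval _ (by positivity) (by omega)
    have := pyChr_inj hva hvb heq
    simp at hlt
    omega
  have hnodup : ((PySem.List.enumerate vs 0).map (fun iv => pyChr (ap + iv.1))).Nodup :=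
    (List.pairwise_map).mpr hp
  have hfold := PySem.Dict.items_foldl_insert_fresh (PySem.List.enumerate vs 0)
    (fun iv => pyChr (ap + iv.1)) (fun iv => iv.2) PySem.Dict.empty
    (fun a _ => PySem.Dict.contains_empty _) hnodup
  have hmap := enum_map vs 0 ap
  rw [add_zero] at hmap
  simpa [PySem.Dict.empty, hmap] using hfold

-- ===== VERDICT (by name: the statement is the Claim_ definition above) =====
theorem keyword_helper_spec : Claim_equal_keyword_helper := by
  intro ap rb kw alph _ hpre
  simp only [Pre_keyword_helper] at hpre
  obtain ⟨hallb, hbound⟩ := hpre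
  have hall : ∀ c ∈ kw.toList, String.singleton c ∈ alph := by
    simpa [List.all_eq_true] using hallb
  unfold Spec_keyword_helper
  simp only [keyword_helper, keyword_helper_alt]
  set K : Int := ((PySem.List.dedup kw.toList).length : Int) with hKdef
  set R : Int := (alph.length : Int) - K with hRdef
  set M : Int := (if 0 < R ∧ ap + K ≤ rb then min R (rb - (ap + K) + 1) else 0) with hMdef
  have hMnn : 0 ≤ M := by rw [hMdef]; split_ifs with h <;> omega
  have HV : ∀ i : Int, 0 ≤ i → i < K + M → ChrOk (ap + i) := by
    intro i h0 hi
    have hb := hbound (by omega)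
    unfold ChrOk
    omega
  set seenF : List String := (khDedup kw.toList [] alph).1 with hseendef
  set remF : List String := (khDedup kw.toList [] alph).2 with hremdef
  have hseenlen : (seenF.length : Int) = K := by
    rw [hseendef, khDedup_nil_fst, List.length_map, hKdef]
  have hremlen : (remF.length : Int) = R := by
    have h := khDedup_len kw.toList [] alph (fun c hc => Or.inl (hall c hc))
    rw [← hseendef, ← hremdef] at h
    simp only [List.length_nil] at h
    omega
  -- A's first loop reaches B's dedup state
  have hA0 : khKeyLoop kw.toList ap PySem.Dict.empty alph
      = (ap + (seenF.length : Int), PySem.Dict.mk (mkItems ap seenF), remF) := by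
    have hA := key_loop kw.toList [] alph ap (by
      intro i h0 hi
      apply HV i h0
      rw [← khDedup_fst kw.toList [] alph, ← hseendef] at hi
      omega)
    rw [← hseendef, ← hremdef] at hA
    simpa [mkItems, PySem.Dict.empty] using hA
  rw [hA0]
  -- A's second loop in closed form
  have hFill : khFill (PySem.Dict.mk (mkItems ap seenF)) remF (ap + (seenF.length : Int)) rb
      = PySem.Dict.mk (mkItems ap seenF ++ mkItems (ap + (seenF.length : Int))
          (remF.take (min (remF.length : Int) (rb - (ap + (seenF.length : Int)) + 1)).toNat)) := by
    have hlt : ∀ i : Int, 0 ≤ i →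
        i < min (remF.length : Int) (rb - (ap + (seenF.length : Int)) + 1) →
        0 ≤ (seenF.length : Int) + i ∧ (seenF.length : Int) + i < K + M := by
      intro i h0 hi
      rw [hMdef]
      constructor
      · omega
      · split_ifs with h <;> omega
    exact fill_items remF (ap + (seenF.length : Int)) rb _
      (by
        intro i h0 hi
        rw [show (mkItems ap seenF : List (String × String))
            = (PySem.Dict.mk (mkItems ap seenF)).items from rfl, ← PySem.Dict.keys,
          show ((PySem.Dict.mk (mkItems ap seenF)).keys : List String)
            = (mkItems ap seenF).map (·.1) from rfl, mem_keys_mkItems]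
        rintro ⟨j, hj0, hj, heq⟩
        have h1 : ChrOk (ap + (seenF.length : Int) + i) := by
          rw [show ap + (seenF.length : Int) + i = ap + ((seenF.length : Int) + i) by ring]
          exact HV _ (hlt i h0 hi).1 (hlt i h0 hi).2
        have h2 : ChrOk (ap + j) := HV j hj0 (by omega)
        have := pyChr_inj h1 h2 heq
        omega)
      (by
        intro i h0 hi
        rw [show ap + (seenF.length : Int) + i = ap + ((seenF.length : Int) + i) by ring]
        exact HV _ (hlt i h0 hi).1 (hlt i h0 hi).2)
  rw [hFill]
  -- B's slice is the same leftover prefix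
  have hslice : PySem.List.slice remF none
        (some (max 0 (min (remF.length : Int) (rb - ap - (seenF.length : Int) + 1))))
      = remF.take (min (remF.length : Int) (rb - (ap + (seenF.length : Int)) + 1)).toNat := by
    rw [PySem.List.slice_to remF
      (b := max 0 (min (remF.length : Int) (rb - ap - (seenF.length : Int) + 1))) (by omega)]
    congr 1
    omega
  rw [hslice]
  -- B's enumerate comprehension builds exactly that association list
  rw [b_build _ ap (by
    intro i h0 hi
    apply HV i h0
    simp only [List.length_append, List.length_take] at hi
    push_cast at hi
    rw [hMdef]
    split_ifs with h <;> omega)]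
  exact (congrArg PySem.Dict.items (congrArg PySem.Dict.mk (mkItems_append seenF _ ap))).symm
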